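-- pv_equiv track=rewrite | github.com/xmutantson/mercury | tools/mercury_benchmark.py | parse_stat_delta
-- ===== SOURCE A (Python) =====
-- def parse_stat_delta(lines, stat_name, start_idx):
--     """Get the change in a cumulative stat counter during [start_idx:].
--
--     Mercury prints stats like 'stats.nNAcked_data= 5' every second.
--     Returns (last_value - value_at_start_idx), i.e. the delta during the window.
--     """
--     def _last_value(line_list):
--         for line in reversed(line_list):
--             if stat_name in line:
--                 try:
--                     return int(line.split('=')[-1].strip())
--                 except (ValueError, IndexError):
--                     continue
--         return 0
--     val_before = _last_value(lines[:start_idx]) if start_idx > 0 else 0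
--     val_after = _last_value(lines)
--     return max(0, val_after - val_before)
-- ===== SOURCE B (Python) =====
-- def parse_stat_delta(lines, stat_name, start_idx):
--     """Single forward indexed sweep keeping the most recent parsed value."""
--     last_before = 0
--     last_after = 0
--     for idx, line in enumerate(lines):
--         if stat_name in line:
--             try:
--                 val = int(line.split('=')[-1].strip())
--             except ValueError:
--                 continue
--             last_after = val
--             if idx < start_idx:
--                 last_before = val
--     return max(0, last_after - last_before)
-- ===== Notes on version B (the rewrite author's own statement) =====
-- stated objective: alternative
-- what changed: Replaced the reversed-scan helper applied twice (once to the prefix slice, once to the whole list) by a single forward enumerate pass that keeps the most recent parsed value before and after start_idx.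
import Mathlib
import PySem

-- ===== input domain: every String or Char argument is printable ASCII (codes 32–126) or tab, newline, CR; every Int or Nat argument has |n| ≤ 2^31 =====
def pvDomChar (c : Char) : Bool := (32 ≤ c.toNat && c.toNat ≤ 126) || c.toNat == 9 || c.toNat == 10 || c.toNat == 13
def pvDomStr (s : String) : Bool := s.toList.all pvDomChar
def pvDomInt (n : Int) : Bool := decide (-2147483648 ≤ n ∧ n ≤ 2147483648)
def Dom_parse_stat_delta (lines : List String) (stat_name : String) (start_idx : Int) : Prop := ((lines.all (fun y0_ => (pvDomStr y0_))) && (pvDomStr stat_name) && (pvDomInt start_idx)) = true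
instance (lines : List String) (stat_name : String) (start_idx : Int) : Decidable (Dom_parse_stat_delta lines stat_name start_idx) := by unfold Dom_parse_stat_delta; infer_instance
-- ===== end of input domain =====

-- B replaces A's reversed-scan helper (run on the prefix slice and again on the whole list)
-- by one forward enumerate pass keeping the latest parsed value; alternative decomposition, same cost.

-- ===== PORT A =====
-- A's helper `_last_value`: scan `reversed(line_list)`, return the first parseable stat line.
-- Transliterated as structural recursion over the already-reversed list.
def pvLastValueA (stat_name : String) : List String → Int
  | [] => 0
  | line :: rest =>
    if PySem.Str.isIn stat_name line then
      match (PySem.Str.split? line "=").bind (fun parts => PySem.List.pyGet? parts (-1)) with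
      | some s =>
        match PySem.Int.ofStr? (PySem.Str.strip s) with
        | some v => v
        | none => pvLastValueA stat_name rest      -- ValueError: continue
      | none => pvLastValueA stat_name rest        -- IndexError: continue (unreachable: split is nonempty)
    else pvLastValueA stat_name rest

def parse_stat_delta (lines : List String) (stat_name : String) (start_idx : Int) : Int :=
  let val_before : Int :=
    if start_idx > 0 then pvLastValueA stat_name (PySem.List.slice lines none (some start_idx)).reverse
    else 0
  let val_after : Int := pvLastValueA stat_name lines.reverse
  max 0 (val_after - val_before)

-- ===== PORT B =====
def parse_stat_delta_alt (lines : List String) (stat_name : String) (start_idx : Int) : Int :=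
  let st :=
    (PySem.List.enumerate lines 0).foldl (fun (st : Int × Int) (p : Int × String) =>
      if PySem.Str.isIn stat_name p.2 then
        match (PySem.Str.split? p.2 "=").bind (fun parts => PySem.List.pyGet? parts (-1)) with
        | some s =>
          match PySem.Int.ofStr? (PySem.Str.strip s) with
          | some v => (if p.1 < start_idx then v else st.1, v)   -- last_after := v; last_before := v if idx < start_idx
          | none => st                                           -- ValueError: continue
        | none => st
      else st) ((0 : Int), (0 : Int))
  max 0 (st.2 - st.1)

-- ===== PRECONDITION & SPEC =====
def Spec_parse_stat_delta (lines : List String) (stat_name : String) (start_idx : Int) (out : Int) : Prop := out = parse_stat_delta_alt lines stat_name start_idx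
instance (lines : List String) (stat_name : String) (start_idx : Int) (out : Int) : Decidable (Spec_parse_stat_delta lines stat_name start_idx out) := by unfold Spec_parse_stat_delta; infer_instance

-- ===== CLAIM (what is proved, stated in full; the proofs are below) =====
def Claim_equal_parse_stat_delta : Prop := ∀ (lines : List String) (stat_name : String) (start_idx : Int), Dom_parse_stat_delta lines stat_name start_idx → Spec_parse_stat_delta lines stat_name start_idx (parse_stat_delta lines stat_name start_idx)

-- ===== LEMMAS AND PROOFS =====

-- the per-line parse attempt both programs make
def pvParse (stat_name line : String) : Option Int :=
  if PySem.Str.isIn stat_name line then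
    ((PySem.Str.split? line "=").bind (fun parts => PySem.List.pyGet? parts (-1))).bind
      (fun s => PySem.Int.ofStr? (PySem.Str.strip s))
  else none

-- B's fold step, written as a match on pvParse
def pvStepB (stat_name : String) (start_idx : Int) (st : Int × Int) (p : Int × String) : Int × Int :=
  match pvParse stat_name p.2 with
  | some v => (if p.1 < start_idx then v else st.1, v)
  | none => st

set_option maxHeartbeats 2000000 in
theorem pvStep_eq (stat_name : String) (start_idx : Int) :
    (fun (st : Int × Int) (p : Int × String) =>
      if PySem.Str.isIn stat_name p.2 then
        match (PySem.Str.split? p.2 "=").bind (fun parts => PySem.List.pyGet? parts (-1)) with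
        | some s =>
          match PySem.Int.ofStr? (PySem.Str.strip s) with
          | some v => (if p.1 < start_idx then v else st.1, v)
          | none => st
        | none => st
      else st) = pvStepB stat_name start_idx := by
  funext st p
  unfold pvStepB pvParse
  by_cases h : PySem.Str.isIn stat_name p.2 = true
  · rw [if_pos h, if_pos h]
    cases hs : (PySem.Str.split? p.2 "=").bind (fun parts => PySem.List.pyGet? parts (-1)) with
    | none => try rfl
    | some s => try rfl
  · rw [if_neg h, if_neg h]
    try rfl

theorem pvStepB_none (stat_name : String) (start_idx : Int) (st : Int × Int) (k : Int) (x : String)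
    (hp : pvParse stat_name x = none) : pvStepB stat_name start_idx st (k, x) = st := by
  simp [pvStepB, hp]

theorem pvStepB_some (stat_name : String) (start_idx : Int) (st : Int × Int) (k : Int) (x : String)
    (v : Int) (hp : pvParse stat_name x = some v) :
    pvStepB stat_name start_idx st (k, x) = (if k < start_idx then v else st.1, v) := by
  simp [pvStepB, hp]

set_option maxHeartbeats 2000000 in
theorem pvLastValueA_cons (stat_name x : String) (r : List String) :
    pvLastValueA stat_name (x :: r)
      = match pvParse stat_name x with
        | some v => v
        | none => pvLastValueA stat_name r := by
  simp only [pvLastValueA]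
  unfold pvParse
  by_cases h : PySem.Str.isIn stat_name x = true
  · rw [if_pos h, if_pos h]
    cases hs : (PySem.Str.split? x "=").bind (fun parts => PySem.List.pyGet? parts (-1)) with
    | none => try rfl
    | some s => try rfl
  · rw [if_neg h, if_neg h]
    try rfl

theorem pvLastValueA_eq (stat_name : String) (l : List String) :
    pvLastValueA stat_name l = (List.findSome? (pvParse stat_name) l).getD 0 := by
  induction l with
  | nil => rfl
  | cons x r ih =>
    rw [pvLastValueA_cons]
    cases hp : pvParse stat_name x with
    | none =>
      have hfs : List.findSome? (pvParse stat_name) (x :: r) = List.findSome? (pvParse stat_name) r := by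
        simp [List.findSome?_cons, hp]
      rw [hfs]
      exact ih
    | some v =>
      have hfs : List.findSome? (pvParse stat_name) (x :: r) = some v := by
        simp [List.findSome?_cons, hp]
      rw [hfs]
      rfl

theorem pvGetD_append_some (P : String → Option Int) (x : String) (v : Int) (hp : P x = some v) :
    ∀ (r : List String) (d : Int),
      (List.findSome? P (r ++ [x])).getD d = (List.findSome? P r).getD v := by
  intro r
  induction r with
  | nil => intro d; simp [List.findSome?_cons, hp]
  | cons a t ih => intro d; cases ha : P a <;> simp [List.findSome?_cons, ha, ih, hp]

theorem pvGetD_append_none (P : String → Option Int) (x : String) (hp : P x = none) :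
    ∀ (r : List String) (d : Int),
      (List.findSome? P (r ++ [x])).getD d = (List.findSome? P r).getD d := by
  intro r
  induction r with
  | nil => intro d; simp [List.findSome?_cons, hp]
  | cons a t ih => intro d; cases ha : P a <;> simp [List.findSome?_cons, ha, ih, hp]

-- invariant of B's single fold, generalized over the index offset and both accumulators
theorem pvFoldB_eq (stat_name : String) (start_idx : Int) (l : List String) :
    ∀ (k lb la : Int),
    List.foldl (pvStepB stat_name start_idx) (lb, la) (PySem.List.enumerate l k)
      = ((List.findSome? (pvParse stat_name) ((l.take ((start_idx - k).toNat)).reverse)).getD lb,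
         (List.findSome? (pvParse stat_name) l.reverse).getD la) := by
  induction l with
  | nil => intro k lb la; simp [PySem.List.enumerate_nil]
  | cons x r ih =>
    intro k lb la
    rw [PySem.List.enumerate_cons, List.foldl_cons]
    cases hp : pvParse stat_name x with
    | none =>
      rw [pvStepB_none stat_name start_idx (lb, la) k x hp, ih (k + 1) lb la,
          List.reverse_cons, pvGetD_append_none (pvParse stat_name) x hp r.reverse la]
      by_cases hk : 0 < start_idx - k
      · rw [show (start_idx - k).toNat = (start_idx - (k + 1)).toNat + 1 from by omega,
            List.take_succ_cons, List.reverse_cons,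
            pvGetD_append_none (pvParse stat_name) x hp
              (List.reverse (List.take ((start_idx - (k + 1)).toNat) r)) lb]
      · rw [show (start_idx - k).toNat = 0 from by omega,
            show (start_idx - (k + 1)).toNat = 0 from by omega]
        simp
    | some v =>
      rw [pvStepB_some stat_name start_idx (lb, la) k x v hp, ih (k + 1),
          List.reverse_cons, pvGetD_append_some (pvParse stat_name) x v hp r.reverse la]
      by_cases hk : k < start_idx
      · rw [if_pos hk,
            show (start_idx - k).toNat = (start_idx - (k + 1)).toNat + 1 from by omega,
            List.take_succ_cons, List.reverse_cons,
            pvGetD_append_some (pvParse stat_name) x v hp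
              (List.reverse (List.take ((start_idx - (k + 1)).toNat) r)) lb]
      · rw [if_neg hk,
            show (start_idx - k).toNat = 0 from by omega,
            show (start_idx - (k + 1)).toNat = 0 from by omega]
        simp

-- ===== VERDICT (by name: the statement is the Claim_ definition above) =====
theorem parse_stat_delta_spec : Claim_equal_parse_stat_delta := by
  intro lines stat_name start_idx _
  unfold Spec_parse_stat_delta
  simp only [parse_stat_delta, parse_stat_delta_alt]
  rw [pvStep_eq stat_name start_idx, pvFoldB_eq stat_name start_idx lines 0 0 0]
  simp only [pvLastValueA_eq]
  by_cases hs : start_idx > 0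
  · rw [if_pos hs, PySem.List.slice_to _ (le_of_lt hs)]
    simp [sub_zero]
  · rw [if_neg hs, show (start_idx - 0).toNat = 0 from by omega]
    simp
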